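-- pv_equiv track=rewrite | github.com/JackLee9355/J.A.C.K.BattleCode | scripts/generator.py | generateBFS
-- ===== SOURCE A (Python) =====
-- import itertools
-- import textwrap
--
-- DIRECTIONS = {
--     (1, 0): "Direction.EAST",
--     (-1, 0): "Direction.WEST",
--     (0, 1): "Direction.NORTH",
--     (0, -1): "Direction.SOUTH",
--     (1, 1): "Direction.NORTHEAST",
--     (-1, 1): "Direction.NORTHWEST",
--     (1, -1): "Direction.SOUTHEAST",
--     (-1, -1): "Direction.SOUTHWEST",
-- }
--
-- def encode(x: int, y: int) -> str:
--     encoding = "0" + str(x) if x >= 0 else "1" + str(abs(x))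
--     encoding += "0" + str(y) if y >= 0 else "1" + str(abs(y))
--     return encoding
--
-- def distanceSquared(x: int, y: int) -> int:
--     return x * x + y * y
--
-- def generateBFS(vision: int) -> str:
--     res = textwrap.indent(textwrap.dedent(f"""
--         /*
--          * PART 2: Single iteration of Bellman-Ford
--          * The single iteration of Bellman-Ford is ran here
--         */
--     """), "\t\t")
--
--     visited = set([encode(0, 0)])
--
--     for r2 in range(1, vision + 1):
--         for x, y in itertools.product(range(-8, 8), range(-8, 8)):
--             if distanceSquared(x, y) == r2:
--                 res += textwrap.indent(textwrap.dedent(f"""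
--                     if (rc.canSenseLocation(loc{encode(x, y)})) {{ // check ({x}, {y})
--                 """), "\t\t").rstrip("\n")
--
--
--                 if r2 <= 2:
--                     res += textwrap.indent(textwrap.dedent(f"""
--                         if (!rc.isLocationOccupied(loc{encode(x, y)}) && rc.sensePassability(loc{encode(x, y)})) {{
--                     """), "\t\t\t").rstrip("\n")
--
--                 surroundings = []
--                 for dx, dy in itertools.product(range(-1, 2), range(-1, 2)):
--                     if (dx, dy) != (0, 0) and distanceSquared(x + dx, y + dy) <= vision:
--                         surroundings.append((dx, dy))
--                 surroundings.sort(key = lambda dist: distanceSquared(x + dist[0], y + dist[1]))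
--
--                 indent = "\t\t\t\t" if r2 <= 2 else "\t\t\t"
--
--                 for dx, dy in surroundings:
--                     if encode(x + dx, y + dy) in visited:
--                         res += textwrap.indent(textwrap.dedent(f"""
--                             if (dist{encode(x, y)} > dist{encode(x + dx, y + dy)}) {{ // from ({x + dx}, {y + dy})
--                                 dist{encode(x, y)} = dist{encode(x + dx, y + dy)};
--                                 dir{encode(x, y)} = {DIRECTIONS[(-dx, -dy)] if (x + dx, y + dy) == (0, 0) else f"dir{encode(x + dx, y + dy)}"};
--                             }}
--                         """), indent)
--
--                 res += f"{indent}dist{encode(x, y)} += 1 + (rc.senseMapInfo(loc{encode(x, y)}).hasCloud() ? 10 : 0);\n"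
--
--                 if r2 <= 2:
--                     res += "\t\t\t}\n"
--
--                 res += "\t\t}\n"
--
--                 visited.add(encode(x, y))
--
--     return res
-- ===== SOURCE B (Python) =====
-- # B: instead of scanning all 256 grid points for every radius 1..vision, group the
-- # grid points by squared distance once and iterate only the (at most 42) occurring
-- # distances in increasing order; each point's code block is built as one join of parts.
--
-- DIRECTIONS = {
--     (1, 0): "Direction.EAST",
--     (-1, 0): "Direction.WEST",
--     (0, 1): "Direction.NORTH",
--     (0, -1): "Direction.SOUTH",
--     (1, 1): "Direction.NORTHEAST",
--     (-1, 1): "Direction.NORTHWEST",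
--     (1, -1): "Direction.SOUTHEAST",
--     (-1, -1): "Direction.SOUTHWEST",
-- }
--
-- _HEADER = ("\n\t\t/* \n\t\t * PART 2: Single iteration of Bellman-Ford\n"
--            "\t\t * The single iteration of Bellman-Ford is ran here\n\t\t*/        \n")
--
--
-- def encode(x: int, y: int) -> str:
--     encoding = "0" + str(x) if x >= 0 else "1" + str(abs(x))
--     encoding += "0" + str(y) if y >= 0 else "1" + str(abs(y))
--     return encoding
--
--
-- def _edge(ind: str, x: int, y: int, dx: int, dy: int) -> str:
--     e, ne = encode(x, y), encode(x + dx, y + dy)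
--     src = DIRECTIONS[(-dx, -dy)] if (x + dx, y + dy) == (0, 0) else f"dir{ne}"
--     return (f"\n{ind}if (dist{e} > dist{ne}) {{ // from ({x + dx}, {y + dy})\n"
--             f"{ind}    dist{e} = dist{ne};\n"
--             f"{ind}    dir{e} = {src};\n"
--             f"{ind}}}\n")
--
--
-- def _block(vision: int, r2: int, x: int, y: int, visited: set) -> str:
--     e = encode(x, y)
--     surr = sorted(
--         [(dx, dy) for dx in range(-1, 2) for dy in range(-1, 2)
--          if (dx, dy) != (0, 0) and (x + dx) ** 2 + (y + dy) ** 2 <= vision],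
--         key=lambda d: (x + d[0]) ** 2 + (y + d[1]) ** 2)
--     ind = "\t\t\t\t" if r2 <= 2 else "\t\t\t"
--     return "".join(
--         [f"\n\t\tif (rc.canSenseLocation(loc{e})) {{ // check ({x}, {y})"]
--         + ([f"\n\t\t\tif (!rc.isLocationOccupied(loc{e}) && rc.sensePassability(loc{e})) {{ "]
--            if r2 <= 2 else [])
--         + [_edge(ind, x, y, dx, dy) for dx, dy in surr
--            if encode(x + dx, y + dy) in visited]
--         + [f"{ind}dist{e} += 1 + (rc.senseMapInfo(loc{e}).hasCloud() ? 10 : 0);\n"]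
--         + (["\t\t\t}\n"] if r2 <= 2 else [])
--         + ["\t\t}\n"])
--
--
-- def generateBFS(vision: int) -> str:
--     groups = {}
--     for x in range(-8, 8):
--         for y in range(-8, 8):
--             groups.setdefault(x * x + y * y, []).append((x, y))
--     visited = {encode(0, 0)}
--     out = [_HEADER]
--     for r2 in sorted(groups):
--         if 1 <= r2 <= vision:
--             for x, y in groups[r2]:
--                 out.append(_block(vision, r2, x, y, visited))
--                 visited.add(encode(x, y))
--     return "".join(out)
-- ===== Notes on version B (the rewrite author's own statement) =====
-- stated objective: faster
-- what changed: B groups the grid points by squared distance once into a dict and iterates only the occurring distances in ascending order instead of scanning the whole grid for every radius up to vision, and builds each point's code block as one join of parts.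
import Mathlib
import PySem

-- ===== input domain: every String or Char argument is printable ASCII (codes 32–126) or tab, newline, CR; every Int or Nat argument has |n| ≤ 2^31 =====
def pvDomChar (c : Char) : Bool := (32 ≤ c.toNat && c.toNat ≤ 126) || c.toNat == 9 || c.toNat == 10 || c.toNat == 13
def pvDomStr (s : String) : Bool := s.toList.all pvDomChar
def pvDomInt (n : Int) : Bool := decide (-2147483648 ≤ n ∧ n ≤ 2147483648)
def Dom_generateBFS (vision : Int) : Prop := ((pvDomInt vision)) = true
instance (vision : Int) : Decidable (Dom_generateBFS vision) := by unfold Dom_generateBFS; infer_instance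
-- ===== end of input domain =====

-- B replaces A's scan of the whole grid for every radius up to vision by one precomputed
-- grouping of the grid points by squared distance, iterating only the occurring distances: faster (measured).

-- ===== PORT A =====
-- shared module helpers: encode, distanceSquared, DIRECTIONS (used verbatim by both Pythons)
def pvEncode (x y : Int) : List Char :=
  (if 0 ≤ x then '0' :: PySem.Int.toChars x else '1' :: PySem.Int.toChars (-x)) ++
  (if 0 ≤ y then '0' :: PySem.Int.toChars y else '1' :: PySem.Int.toChars (-y))

def pvD (x y : Int) : Int := x * x + y * y

-- DIRECTIONS dict literal, built by insertion; looked up only at keys it contains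
def pvDirs : PySem.Dict (Int × Int) (List Char) :=
  (((((((((PySem.Dict.empty : PySem.Dict (Int × Int) (List Char)).insert (1, 0) "Direction.EAST".toList).insert
    (-1, 0) "Direction.WEST".toList).insert (0, 1) "Direction.NORTH".toList).insert
    (0, -1) "Direction.SOUTH".toList).insert (1, 1) "Direction.NORTHEAST".toList).insert
    (-1, 1) "Direction.NORTHWEST".toList).insert (1, -1) "Direction.SOUTHEAST".toList).insert
    (-1, -1) "Direction.SOUTHWEST".toList)

-- itertools.product(range(-8, 8), range(-8, 8)) and product(range(-1, 2), range(-1, 2))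
def pvGrid : List (Int × Int) :=
  (PySem.List.pyRange (-8) 8 1).flatMap (fun x => (PySem.List.pyRange (-8) 8 1).map (fun y => (x, y)))
def pvDeltas : List (Int × Int) :=
  (PySem.List.pyRange (-1) 2 1).flatMap (fun dx => (PySem.List.pyRange (-1) 2 1).map (fun dy => (dx, dy)))

-- the textwrap.indent(textwrap.dedent(...)) templates, constant-folded by hand: the inserted
-- values (encode strings, coordinates) contain no newlines or leading whitespace, so the
-- dedent margin and indent prefixes are those of the constant template — exact.
def pvHeader : List Char :=
  "\n\t\t/* \n\t\t * PART 2: Single iteration of Bellman-Ford\n\t\t * The single iteration of Bellman-Ford is ran here\n\t\t*/        \n".toList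
def pvCheck (x y : Int) : List Char :=
  "\n\t\tif (rc.canSenseLocation(loc".toList ++ pvEncode x y ++ ")) { // check (".toList ++
    PySem.Int.toChars x ++ ", ".toList ++ PySem.Int.toChars y ++ ")".toList
def pvOcc (x y : Int) : List Char :=
  "\n\t\t\tif (!rc.isLocationOccupied(loc".toList ++ pvEncode x y ++
    ") && rc.sensePassability(loc".toList ++ pvEncode x y ++ ")) { ".toList
def pvEdge (ind : List Char) (x y dx dy : Int) : List Char :=
  '\n' :: ind ++ "if (dist".toList ++ pvEncode x y ++ " > dist".toList ++ pvEncode (x + dx) (y + dy) ++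
    ") { // from (".toList ++ PySem.Int.toChars (x + dx) ++ ", ".toList ++ PySem.Int.toChars (y + dy) ++ ")\n".toList ++
  ind ++ "    dist".toList ++ pvEncode x y ++ " = dist".toList ++ pvEncode (x + dx) (y + dy) ++ ";\n".toList ++
  ind ++ "    dir".toList ++ pvEncode x y ++ " = ".toList ++
    (if (x + dx, y + dy) = ((0 : Int), (0 : Int)) then pvDirs.getD (-dx, -dy) []
     else "dir".toList ++ pvEncode (x + dx) (y + dy)) ++ ";\n".toList ++
  ind ++ "}\n".toList
def pvDistLine (x y : Int) : List Char :=
  "dist".toList ++ pvEncode x y ++ " += 1 + (rc.senseMapInfo(loc".toList ++ pvEncode x y ++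
    ").hasCloud() ? 10 : 0);\n".toList

-- A's loop body for one point (x, y) at radius r2: sequential appends to res, as in A
def pvEmitA (vision r2 x y : Int) (st : List Char × PySem.Set (List Char)) :
    List Char × PySem.Set (List Char) :=
  let res := st.1 ++ pvCheck x y
  let res := if r2 ≤ 2 then res ++ pvOcc x y else res
  let surr := PySem.List.sorted
    (pvDeltas.foldl (fun acc d =>
        if decide (¬ d = ((0 : Int), (0 : Int)) ∧ pvD (x + d.1) (y + d.2) ≤ vision)
        then acc ++ [d] else acc) [])
    (fun d => pvD (x + d.1) (y + d.2)) false
  let ind := if r2 ≤ 2 then "\t\t\t\t".toList else "\t\t\t".toList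
  let res := surr.foldl (fun r d =>
      if PySem.Set.contains st.2 (pvEncode (x + d.1) (y + d.2))
      then r ++ pvEdge ind x y d.1 d.2 else r) res
  let res := res ++ ind ++ pvDistLine x y
  let res := if r2 ≤ 2 then res ++ "\t\t\t}\n".toList else res
  let res := res ++ "\t\t}\n".toList
  (res, PySem.Set.add st.2 (pvEncode x y))

def generateBFS (vision : Int) : String :=
  let st0 : List Char × PySem.Set (List Char) := (pvHeader, PySem.Set.ofList [pvEncode 0 0])
  let st := (PySem.List.pyRange 1 (vision + 1) 1).foldl (fun st r2 =>
      pvGrid.foldl (fun st p =>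
        if pvD p.1 p.2 == r2 then pvEmitA vision r2 p.1 p.2 st else st) st) st0
  String.ofList st.1

-- ===== PORT B =====
-- B: surroundings as a filtered comprehension, then the stable sort
def pvSurrB (vision x y : Int) : List (Int × Int) :=
  PySem.List.sorted
    (pvDeltas.filter (fun d =>
        decide (¬ d = ((0 : Int), (0 : Int)) ∧ pvD (x + d.1) (y + d.2) ≤ vision)))
    (fun d => pvD (x + d.1) (y + d.2)) false

-- B: the whole block of one point as a single join of parts
def pvBlockB (vision r2 x y : Int) (visited : PySem.Set (List Char)) : List Char :=
  let ind := if r2 ≤ 2 then "\t\t\t\t".toList else "\t\t\t".toList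
  ([pvCheck x y]
    ++ (if r2 ≤ 2 then [pvOcc x y] else [])
    ++ ((pvSurrB vision x y).filter (fun d =>
          PySem.Set.contains visited (pvEncode (x + d.1) (y + d.2)))).map
        (fun d => pvEdge ind x y d.1 d.2)
    ++ [ind ++ pvDistLine x y]
    ++ (if r2 ≤ 2 then ["\t\t\t}\n".toList] else [])
    ++ ["\t\t}\n".toList]).flatten

-- B: groups.setdefault(x*x+y*y, []).append((x, y)) over the grid, once
def pvGroups : PySem.Dict Int (List (Int × Int)) :=
  pvGrid.foldl (fun g p => g.modify (pvD p.1 p.2) [] (· ++ [p])) PySem.Dict.empty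

def generateBFS_alt (vision : Int) : String :=
  let st0 : List Char × PySem.Set (List Char) := (pvHeader, PySem.Set.ofList [pvEncode 0 0])
  let st := (PySem.List.sorted pvGroups.keys (fun k => k) false).foldl (fun st r2 =>
      if 1 ≤ r2 ∧ r2 ≤ vision then
        (pvGroups.getD r2 []).foldl (fun st p =>
          (st.1 ++ pvBlockB vision r2 p.1 p.2 st.2, PySem.Set.add st.2 (pvEncode p.1 p.2))) st
      else st) st0
  String.ofList st.1

-- ===== PRECONDITION & SPEC =====
def Spec_generateBFS (vision : Int) (out : String) : Prop := out = generateBFS_alt vision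
instance (vision : Int) (out : String) : Decidable (Spec_generateBFS vision out) := by unfold Spec_generateBFS; infer_instance

-- ===== CLAIM (what is proved, stated in full; the proofs are below) =====
def Claim_equal_generateBFS : Prop := ∀ (vision : Int), Dom_generateBFS vision → Spec_generateBFS vision (generateBFS vision)

-- ===== LEMMAS AND PROOFS =====

-- the squared distances ≥ 1 that occur on the grid, ascending
def pvK : List Int :=
  [1, 2, 4, 5, 8, 9, 10, 13, 16, 17, 18, 20, 25, 26, 29, 32, 34, 36, 37, 40, 41,
   45, 49, 50, 52, 53, 58, 61, 64, 65, 68, 72, 73, 74, 80, 85, 89, 98, 100, 113, 128]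

set_option maxRecDepth 100000 in
lemma pvK_sorted : pvK.Pairwise (· < ·) := by decide
set_option maxRecDepth 100000 in
lemma pvK_pos : ∀ k ∈ pvK, 1 ≤ k := by decide
set_option maxRecDepth 100000 in
lemma pvGrid_d : ∀ p ∈ pvGrid, pvD p.1 p.2 = 0 ∨ pvD p.1 p.2 ∈ pvK := by decide
set_option maxRecDepth 100000 in
lemma pvKeys_sorted : PySem.List.sorted pvGroups.keys (fun k => k) false = 0 :: pvK := by decide
set_option maxRecDepth 100000 in
lemma pvGroups_getD : ∀ r2 ∈ pvK,
    pvGroups.getD r2 [] = pvGrid.filter (fun p => pvD p.1 p.2 == r2) := by decide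

-- a fold that conditionally appends list pieces is the flattened map over the filter
lemma pv_foldl_if_append_flatten {α : Type} (p : α → Bool) (g : α → List Char) :
    ∀ (l : List α) (a : List Char),
      l.foldl (fun r d => if p d then r ++ g d else r) a = a ++ ((l.filter p).map g).flatten := by
  intro l
  induction l with
  | nil => intro a; simp
  | cons x t ih =>
    intro a
    by_cases h : p x = true <;>
      simp [List.foldl_cons, h, ih, List.append_assoc]

-- a fold whose body fixes the state is the identity
lemma pv_foldl_id {σ : Type} (F : σ → Int → σ) :
    ∀ (l : List Int) (st : σ), (∀ x ∈ l, ∀ s, F s x = s) → l.foldl F st = st := by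
  intro l
  induction l with
  | nil => intro st _; rfl
  | cons x t ih =>
    intro st h
    rw [List.foldl_cons, h x List.mem_cons_self st]
    exact ih st fun y hy s => h y (List.mem_cons_of_mem x hy) s

-- folding over range(a, b) equals folding over the ascending support list cut at b
lemma pv_foldl_range_support {σ : Type} (F : σ → Int → σ) :
    ∀ (K : List Int), K.Pairwise (· < ·) →
      ∀ (a b : Int) (st : σ), (∀ k ∈ K, a ≤ k) →
        (∀ r, a ≤ r → r < b → r ∉ K → ∀ s, F s r = s) →
        (PySem.List.pyRange a b 1).foldl F st = (K.filter (fun k => decide (k < b))).foldl F st := by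
  intro K
  induction K with
  | nil =>
    intro _ a b st _ hid
    simp only [List.filter_nil, List.foldl_nil]
    apply pv_foldl_id
    intro r hr s
    have hm := (PySem.List.mem_pyRange_one).1 hr
    exact hid r hm.1 hm.2 (by simp) s
  | cons k K' ih =>
    intro hpw a b st hlo hid
    obtain ⟨hk', hpw'⟩ := List.pairwise_cons.1 hpw
    by_cases hb : k < b
    · have hak : a ≤ k := hlo k List.mem_cons_self
      rw [PySem.List.pyRange_one_append a k b hak (le_of_lt hb), List.foldl_append]
      have hpre : List.foldl F st (PySem.List.pyRange a k 1) = st := by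
        apply pv_foldl_id
        intro r hr s
        have hm := (PySem.List.mem_pyRange_one).1 hr
        apply hid r hm.1 (lt_trans hm.2 hb)
        intro hc
        rcases List.mem_cons.1 hc with h | h
        · omega
        · have := hk' r h; omega
      have hstep : (k :: K').filter (fun j => decide (j < b))
          = k :: K'.filter (fun j => decide (j < b)) := by
        simp [hb]
      rw [hpre, PySem.List.pyRange_one_cons hb, List.foldl_cons, hstep, List.foldl_cons]
      apply ih hpw' (k + 1) b (F st k)
      · intro j hj; have := hk' j hj; omega
      · intro r h1 h2 hrK s
        apply hid r (by omega) h2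
        intro hc
        rcases List.mem_cons.1 hc with h | h
        · omega
        · exact hrK h
    · have hfil : (k :: K').filter (fun j => decide (j < b)) = [] := by
        apply List.filter_eq_nil_iff.2
        intro j hj
        rcases List.mem_cons.1 hj with h | h
        · subst h; simp; omega
        · have := hk' j h; simp; omega
      rw [hfil, List.foldl_nil]
      apply pv_foldl_id
      intro r hr s
      have hm := (PySem.List.mem_pyRange_one).1 hr
      apply hid r hm.1 hm.2
      intro hc
      rcases List.mem_cons.1 hc with h | h
      · omega
      · have := hk' r h; omega

-- A's per-point emission equals appending B's joined block (same visited update)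
lemma pv_emit_eq (vision r2 x y : Int) (st : List Char × PySem.Set (List Char)) :
    pvEmitA vision r2 x y st = (st.1 ++ pvBlockB vision r2 x y st.2, PySem.Set.add st.2 (pvEncode x y)) := by
  simp only [pvEmitA, pvBlockB, pvSurrB, PySem.List.foldl_append_if_eq_filter,
    pv_foldl_if_append_flatten]
  split_ifs <;> simp [List.append_assoc]

-- A's scan of the whole grid at radius r2 processes exactly the points at that distance
lemma pv_body_filter (vision r2 : Int) (st : List Char × PySem.Set (List Char)) :
    pvGrid.foldl (fun st p => if pvD p.1 p.2 == r2 then pvEmitA vision r2 p.1 p.2 st else st) st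
      = (pvGrid.filter (fun p => pvD p.1 p.2 == r2)).foldl
          (fun st p => pvEmitA vision r2 p.1 p.2 st) st :=
  PySem.List.foldl_if_eq_foldl_filter _ _ _ _

lemma pv_body_id (vision r2 : Int) (h1 : 1 ≤ r2) (hK : r2 ∉ pvK)
    (st : List Char × PySem.Set (List Char)) :
    pvGrid.foldl (fun st p => if pvD p.1 p.2 == r2 then pvEmitA vision r2 p.1 p.2 st else st) st = st := by
  rw [pv_body_filter]
  have : pvGrid.filter (fun p => pvD p.1 p.2 == r2) = [] := by
    apply List.filter_eq_nil_iff.2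
    intro p hp
    rcases pvGrid_d p hp with h | h
    · simp; omega
    · simp only [beq_iff_eq]; intro hc; exact hK (hc ▸ h)
  rw [this, List.foldl_nil]

-- ===== VERDICT (by name: the statement is the Claim_ definition above) =====
theorem generateBFS_spec : Claim_equal_generateBFS := by
  intro vision _
  unfold Spec_generateBFS generateBFS generateBFS_alt
  simp only []
  rw [pvKeys_sorted, List.foldl_cons]
  have h0 : (if (1 : Int) ≤ 0 ∧ (0 : Int) ≤ vision then
      (pvGroups.getD 0 []).foldl (fun st p =>
        (st.1 ++ pvBlockB vision 0 p.1 p.2 st.2, PySem.Set.add st.2 (pvEncode p.1 p.2)))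
        (pvHeader, PySem.Set.ofList [pvEncode 0 0])
    else (pvHeader, PySem.Set.ofList [pvEncode 0 0]))
      = (pvHeader, PySem.Set.ofList [pvEncode 0 0]) := by norm_num
  rw [h0]
  rw [PySem.List.foldl_ite_eq_foldl_filter]
  rw [pv_foldl_range_support _ pvK pvK_sorted 1 (vision + 1) _ pvK_pos
    (fun r h1 _ hrK s => pv_body_id vision r h1 hrK s)]
  have hfil : pvK.filter (fun k => decide (k < vision + 1))
      = pvK.filter (fun k => decide (1 ≤ k ∧ k ≤ vision)) := by
    apply List.filter_congr
    intro k hk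
    have := pvK_pos k hk
    simp only [decide_eq_decide]
    omega
  rw [hfil]
  apply congrArg String.ofList
  apply congrArg Prod.fst
  apply PySem.List.foldl_congr_mem'
  intro k hk st
  have hkK : k ∈ pvK := (List.mem_filter.1 hk).1
  rw [pv_body_filter, ← pvGroups_getD k hkK]
  apply PySem.List.foldl_congr_mem'
  intro p _ st
  exact pv_emit_eq vision k p.1 p.2 st
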